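-- pv_equiv track=rewrite | github.com/Uradouby/AutocastBU | main.py | split_questions_by_status
-- ===== SOURCE A (Python) =====
-- def split_questions_by_status(autocast_questions, time):
--     resolved_before_time_questions = []
--     resolved_after_time_questions = []
--     unresolved_before_time_questions = []
--     unresolved_after_time_questions = []
--     for q in autocast_questions:
--         if q['status'] == 'Resolved':
--             if q['close_time'] < time:
--                 resolved_before_time_questions.append(q)
--             else:
--                 resolved_after_time_questions.append(q)
--         else:
--             if q['publish_time'] < time:
--                 unresolved_before_time_questions.append(q)
--             else:
--                 unresolved_after_time_questions.append(q)
--     return resolved_before_time_questions, resolved_after_time_questions, unresolved_before_time_questions, unresolved_after_time_questions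
-- ===== SOURCE B (Python) =====
-- def split_questions_by_status(autocast_questions, time):
--     resolved = [q for q in autocast_questions if q['status'] == 'Resolved']
--     unresolved = [q for q in autocast_questions if q['status'] != 'Resolved']
--     return ([q for q in resolved if q['close_time'] < time],
--             [q for q in resolved if not q['close_time'] < time],
--             [q for q in unresolved if q['publish_time'] < time],
--             [q for q in unresolved if not q['publish_time'] < time])
-- ===== Notes on version B (the rewrite author's own statement) =====
-- stated objective: alternative
-- what changed: Replaced the single four-way branching accumulator loop by a group-first decomposition: partition by status into resolved/unresolved, then filter each group on its own time key.
import Mathlib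
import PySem

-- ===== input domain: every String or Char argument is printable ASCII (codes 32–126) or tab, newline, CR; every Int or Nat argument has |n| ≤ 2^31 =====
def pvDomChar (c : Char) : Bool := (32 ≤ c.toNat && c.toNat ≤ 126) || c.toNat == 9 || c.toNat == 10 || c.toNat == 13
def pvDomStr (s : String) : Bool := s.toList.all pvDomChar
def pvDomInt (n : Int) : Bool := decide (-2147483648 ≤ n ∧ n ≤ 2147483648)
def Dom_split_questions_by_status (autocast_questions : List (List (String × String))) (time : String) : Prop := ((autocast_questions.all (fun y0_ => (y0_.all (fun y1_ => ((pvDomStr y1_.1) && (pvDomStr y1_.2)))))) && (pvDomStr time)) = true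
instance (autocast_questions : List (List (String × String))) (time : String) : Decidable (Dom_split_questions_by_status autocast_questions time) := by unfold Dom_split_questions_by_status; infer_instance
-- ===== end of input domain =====

-- B replaces A's single four-way branching loop by a group-first decomposition
-- (partition by status, then filter each group on its own time key); alternative, same cost.

-- dict lookup q[k]: first matching key (dicts have unique keys; Pre_ guarantees presence)
def pvLookup (q : List (String × String)) (k : String) : String :=
  (((q.find? (fun p => p.1 == k)).map (·.2)).getD "")

-- ===== PORT A =====
-- the body of A's for-loop over q, on the four accumulator lists
def pvStepA (time : String) (acc : (List (List (String × String))) × (List (List (String × String))) × (List (List (String × String))) × (List (List (String × String)))) (q : List (String × String)) : (List (List (String × String))) × (List (List (String × String))) × (List (List (String × String))) × (List (List (String × String))) :=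
  if pvLookup q "status" == "Resolved" then
    if pvLookup q "close_time" < time then
      (acc.1 ++ [q], acc.2.1, acc.2.2.1, acc.2.2.2)
    else
      (acc.1, acc.2.1 ++ [q], acc.2.2.1, acc.2.2.2)
  else
    if pvLookup q "publish_time" < time then
      (acc.1, acc.2.1, acc.2.2.1 ++ [q], acc.2.2.2)
    else
      (acc.1, acc.2.1, acc.2.2.1, acc.2.2.2 ++ [q])

def split_questions_by_status (autocast_questions : List (List (String × String))) (time : String) : (List (List (String × String))) × (List (List (String × String))) × (List (List (String × String))) × (List (List (String × String))) :=
  autocast_questions.foldl (pvStepA time) ([], [], [], [])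

-- ===== PORT B =====
def split_questions_by_status_alt (autocast_questions : List (List (String × String))) (time : String) : (List (List (String × String))) × (List (List (String × String))) × (List (List (String × String))) × (List (List (String × String))) :=
  let resolved := autocast_questions.filter (fun q => pvLookup q "status" == "Resolved")
  let unresolved := autocast_questions.filter (fun q => !(pvLookup q "status" == "Resolved"))
  (resolved.filter (fun q => decide (pvLookup q "close_time" < time)),
   resolved.filter (fun q => !decide (pvLookup q "close_time" < time)),
   unresolved.filter (fun q => decide (pvLookup q "publish_time" < time)),
   unresolved.filter (fun q => !decide (pvLookup q "publish_time" < time)))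

-- ===== PRECONDITION & SPEC =====
-- Pre_ excludes exactly the inputs where Python A raises KeyError: a question missing
-- 'status', or missing the time key ('close_time'/'publish_time') its branch reads.
def Pre_split_questions_by_status (autocast_questions : List (List (String × String))) (time : String) : Prop :=
  ∀ q ∈ autocast_questions,
    (q.find? (fun p => p.1 == "status")).isSome = true ∧
    (if pvLookup q "status" == "Resolved" then (q.find? (fun p => p.1 == "close_time")).isSome = true
     else (q.find? (fun p => p.1 == "publish_time")).isSome = true)
instance (autocast_questions : List (List (String × String))) (time : String) : Decidable (Pre_split_questions_by_status autocast_questions time) := by unfold Pre_split_questions_by_status; infer_instance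

def pvWitness_split_questions_by_status : (List (List (String × String))) × String :=
  ([[("status", "Resolved"), ("close_time", "a")], [("status", "Open"), ("publish_time", "z")]], "m")

def Spec_split_questions_by_status (autocast_questions : List (List (String × String))) (time : String) (out : (List (List (String × String))) × (List (List (String × String))) × (List (List (String × String))) × (List (List (String × String)))) : Prop := out = split_questions_by_status_alt autocast_questions time
instance (autocast_questions : List (List (String × String))) (time : String) (out : (List (List (String × String))) × (List (List (String × String))) × (List (List (String × String))) × (List (List (String × String)))) : Decidable (Spec_split_questions_by_status autocast_questions time out) := by unfold Spec_split_questions_by_status; infer_instance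

-- ===== CLAIM (what is proved, stated in full; the proofs are below) =====
def Claim_equal_split_questions_by_status : Prop := ∀ (autocast_questions : List (List (String × String))) (time : String), Dom_split_questions_by_status autocast_questions time → Pre_split_questions_by_status autocast_questions time → Spec_split_questions_by_status autocast_questions time (split_questions_by_status autocast_questions time)

-- ===== LEMMAS AND PROOFS =====
theorem splitq_fold_eq (time : String) (qs : List (List (String × String)))
    (a b c d : List (List (String × String))) :
    qs.foldl (pvStepA time) (a, b, c, d) =
    (a ++ (qs.filter (fun q => pvLookup q "status" == "Resolved")).filter (fun q => decide (pvLookup q "close_time" < time)),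
     b ++ (qs.filter (fun q => pvLookup q "status" == "Resolved")).filter (fun q => !decide (pvLookup q "close_time" < time)),
     c ++ (qs.filter (fun q => !(pvLookup q "status" == "Resolved"))).filter (fun q => decide (pvLookup q "publish_time" < time)),
     d ++ (qs.filter (fun q => !(pvLookup q "status" == "Resolved"))).filter (fun q => !decide (pvLookup q "publish_time" < time))) := by
  induction qs generalizing a b c d with
  | nil => simp
  | cons q qs ih =>
    rw [List.foldl_cons]
    by_cases hs : (pvLookup q "status" == "Resolved") = true <;>
      by_cases hc : (pvLookup q "close_time" < time) <;>
      by_cases hp : (pvLookup q "publish_time" < time) <;>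
      simp only [pvStepA, hs, hc, hp, if_true, if_false] <;>
      rw [ih] <;>
      simp [hs, hc, hp, List.append_assoc, ← String.lt_iff_toList_lt]

-- ===== VERDICT (by name: the statement is the Claim_ definition above) =====
theorem split_questions_by_status_spec : Claim_equal_split_questions_by_status := by
  intro qs time _ _
  unfold Spec_split_questions_by_status split_questions_by_status split_questions_by_status_alt
  simpa using splitq_fold_eq time qs [] [] [] []
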